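-- pv_equiv track=rewrite | github.com/ARaZoAnna/algorithm | PGS/Level0/no87.py | solution
-- ===== SOURCE A (Python) =====
-- def solution(myString):
--     answer = ''
--     for alph in myString :
--         if alph == "a" :
--             alph = "A"
--         elif "B" <= alph <= "Z" :
--             alph = chr(ord(alph)+32)
--         answer += alph
--     return answer
-- ===== SOURCE B (Python) =====
-- def solution(myString):
--     table = str.maketrans({'a': 'A', **{chr(ord('B') + i): chr(ord('b') + i) for i in range(25)}})
--     return myString.translate(table)
-- ===== Notes on version B (the rewrite author's own statement) =====
-- stated objective: idiomatic
-- what changed: Replaced the explicit per-character if/elif accumulation loop by a translation table built once with str.maketrans ('a'->'A', 'B'..'Z'->lowercase) applied via str.translate in a single table-driven pass.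
import Mathlib
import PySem

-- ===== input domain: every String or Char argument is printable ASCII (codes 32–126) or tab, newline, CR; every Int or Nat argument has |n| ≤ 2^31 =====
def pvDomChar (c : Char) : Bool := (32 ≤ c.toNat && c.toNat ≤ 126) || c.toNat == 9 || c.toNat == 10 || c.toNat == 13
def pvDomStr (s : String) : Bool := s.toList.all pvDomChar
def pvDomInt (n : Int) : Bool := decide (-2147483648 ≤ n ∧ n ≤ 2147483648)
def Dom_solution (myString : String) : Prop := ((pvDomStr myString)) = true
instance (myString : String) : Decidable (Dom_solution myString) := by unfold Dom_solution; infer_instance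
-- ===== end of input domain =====

-- B replaces A's per-character if/elif loop by a translation table ('a'→'A', 'B'..'Z'→lowercase) built once and applied in one table-driven pass (objective: idiomatic; same value on every input).

-- ===== PORT A =====
def solution (myString : String) : String :=
  String.mk (myString.toList.foldl (fun answer alph =>
    answer ++ [if alph = 'a' then 'A'
               else if 'B' ≤ alph ∧ alph ≤ 'Z' then Char.ofNat (alph.toNat + 32)
               else alph]) [])

-- ===== PORT B =====
-- the translation table: 'a'→'A' and chr(66+i)→chr(98+i) for i in range(25)  (= str.maketrans's dict)
def pvTable : PySem.Dict Char Char :=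
  PySem.Dict.ofList (('a', 'A') :: (List.range 25).map (fun i => (Char.ofNat (66 + i), Char.ofNat (98 + i))))

-- myString.translate(table): each character is replaced by its table entry, absent keys pass through
def solution_alt (myString : String) : String :=
  String.mk (myString.toList.map (fun c => pvTable.getD c c))

-- ===== PRECONDITION & SPEC =====
def Spec_solution (myString : String) (out : String) : Prop := out = solution_alt myString
instance (myString : String) (out : String) : Decidable (Spec_solution myString out) := by unfold Spec_solution; infer_instance

-- ===== CLAIM (what is proved, stated in full; the proofs are below) =====
def Claim_equal_solution : Prop := ∀ (myString : String), Dom_solution myString → Spec_solution myString (solution myString)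

-- ===== LEMMAS AND PROOFS =====
theorem pvCharToNatInj {c k : Char} (h : c.toNat = k.toNat) : c = k := by
  have h1 := Char.ofNat_toNat c
  have h2 := Char.ofNat_toNat k
  rw [h] at h1
  exact h1.symm.trans h2

-- pvTable as an explicit chain of inserts, so PySem.Dict.getD_insert peels it key by key
theorem pvTable_eq : pvTable = ((((((((((((((((((((((((((PySem.Dict.empty.insert 'a' 'A').insert 'B' 'b').insert 'C' 'c').insert 'D' 'd').insert 'E' 'e').insert 'F' 'f').insert 'G' 'g').insert 'H' 'h').insert 'I' 'i').insert 'J' 'j').insert 'K' 'k').insert 'L' 'l').insert 'M' 'm').insert 'N' 'n').insert 'O' 'o').insert 'P' 'p').insert 'Q' 'q').insert 'R' 'r').insert 'S' 's').insert 'T' 't').insert 'U' 'u').insert 'V' 'v').insert 'W' 'w').insert 'X' 'x').insert 'Y' 'y').insert 'Z' 'z') := by decide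

-- the per-character actions of A and B coincide on every character
theorem pvChar_eq (c : Char) :
    (if c = 'a' then 'A'
     else if 'B' ≤ c ∧ c ≤ 'Z' then Char.ofNat (c.toNat + 32)
     else c) = pvTable.getD c c := by
  rw [pvTable_eq]
  by_cases h0 : c = 'a'
  · subst h0; decide
  by_cases h1 : c = 'B'
  · subst h1; decide
  by_cases h2 : c = 'C'
  · subst h2; decide
  by_cases h3 : c = 'D'
  · subst h3; decide
  by_cases h4 : c = 'E'
  · subst h4; decide
  by_cases h5 : c = 'F'
  · subst h5; decide
  by_cases h6 : c = 'G'
  · subst h6; decide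
  by_cases h7 : c = 'H'
  · subst h7; decide
  by_cases h8 : c = 'I'
  · subst h8; decide
  by_cases h9 : c = 'J'
  · subst h9; decide
  by_cases h10 : c = 'K'
  · subst h10; decide
  by_cases h11 : c = 'L'
  · subst h11; decide
  by_cases h12 : c = 'M'
  · subst h12; decide
  by_cases h13 : c = 'N'
  · subst h13; decide
  by_cases h14 : c = 'O'
  · subst h14; decide
  by_cases h15 : c = 'P'
  · subst h15; decide
  by_cases h16 : c = 'Q'
  · subst h16; decide
  by_cases h17 : c = 'R'
  · subst h17; decide
  by_cases h18 : c = 'S'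
  · subst h18; decide
  by_cases h19 : c = 'T'
  · subst h19; decide
  by_cases h20 : c = 'U'
  · subst h20; decide
  by_cases h21 : c = 'V'
  · subst h21; decide
  by_cases h22 : c = 'W'
  · subst h22; decide
  by_cases h23 : c = 'X'
  · subst h23; decide
  by_cases h24 : c = 'Y'
  · subst h24; decide
  by_cases h25 : c = 'Z'
  · subst h25; decide
  have hrange : ¬ ('B' ≤ c ∧ c ≤ 'Z') := by
    rintro ⟨hl, hr⟩
    have nl : 66 ≤ c.toNat := Nat.succ_le_of_lt hl
    have nr : c.toNat ≤ 90 := Fin.mk_le_mk.mp hr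
    have n0 : c.toNat ≠ 66 := fun he => h1 (pvCharToNatInj he)
    have n1 : c.toNat ≠ 67 := fun he => h2 (pvCharToNatInj he)
    have n2 : c.toNat ≠ 68 := fun he => h3 (pvCharToNatInj he)
    have n3 : c.toNat ≠ 69 := fun he => h4 (pvCharToNatInj he)
    have n4 : c.toNat ≠ 70 := fun he => h5 (pvCharToNatInj he)
    have n5 : c.toNat ≠ 71 := fun he => h6 (pvCharToNatInj he)
    have n6 : c.toNat ≠ 72 := fun he => h7 (pvCharToNatInj he)
    have n7 : c.toNat ≠ 73 := fun he => h8 (pvCharToNatInj he)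
    have n8 : c.toNat ≠ 74 := fun he => h9 (pvCharToNatInj he)
    have n9 : c.toNat ≠ 75 := fun he => h10 (pvCharToNatInj he)
    have n10 : c.toNat ≠ 76 := fun he => h11 (pvCharToNatInj he)
    have n11 : c.toNat ≠ 77 := fun he => h12 (pvCharToNatInj he)
    have n12 : c.toNat ≠ 78 := fun he => h13 (pvCharToNatInj he)
    have n13 : c.toNat ≠ 79 := fun he => h14 (pvCharToNatInj he)
    have n14 : c.toNat ≠ 80 := fun he => h15 (pvCharToNatInj he)
    have n15 : c.toNat ≠ 81 := fun he => h16 (pvCharToNatInj he)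
    have n16 : c.toNat ≠ 82 := fun he => h17 (pvCharToNatInj he)
    have n17 : c.toNat ≠ 83 := fun he => h18 (pvCharToNatInj he)
    have n18 : c.toNat ≠ 84 := fun he => h19 (pvCharToNatInj he)
    have n19 : c.toNat ≠ 85 := fun he => h20 (pvCharToNatInj he)
    have n20 : c.toNat ≠ 86 := fun he => h21 (pvCharToNatInj he)
    have n21 : c.toNat ≠ 87 := fun he => h22 (pvCharToNatInj he)
    have n22 : c.toNat ≠ 88 := fun he => h23 (pvCharToNatInj he)
    have n23 : c.toNat ≠ 89 := fun he => h24 (pvCharToNatInj he)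
    have n24 : c.toNat ≠ 90 := fun he => h25 (pvCharToNatInj he)
    omega
  simp [PySem.Dict.getD_insert, PySem.Dict.getD_empty, hrange, h0, h1, h2, h3, h4, h5, h6, h7, h8, h9, h10, h11, h12, h13, h14, h15, h16, h17, h18, h19, h20, h21, h22, h23, h24, h25]

-- ===== VERDICT (by name: the statement is the Claim_ definition above) =====
theorem solution_spec : Claim_equal_solution := by
  intro myString _
  unfold Spec_solution solution solution_alt
  rw [PySem.List.foldl_append_singleton_eq_map]
  rw [List.nil_append]
  congr 1
  exact List.map_congr_left (fun c _ => pvChar_eq c)
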